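-- pv_equiv track=rewrite | github.com/joeShuff/Discord-DealBot | commands/store_search.py | store_from_search
-- ===== SOURCE A (Python) =====
-- supported_stores = {
--     "steam": [
--
--     ],
--     "epic": [
--         "epic store",
--         "epic games"
--     ],
--     "gog": [
--         "good old games"
--     ],
--     "humblestore": [
--         "humble"
--     ],
--     "uplay": [
--
--     ],
--     "microsoft": [
--
--     ]
-- }
--
-- def store_from_search(search):
--     for store in supported_stores.keys():
--         if store == search:
--             return store
--         else:
--             for alt_store_name in supported_stores[store]:
--                 if alt_store_name == search:
--                     return store
--
--     return None
-- ===== SOURCE B (Python) =====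
-- supported_stores = {
--     "steam": [
--
--     ],
--     "epic": [
--         "epic store",
--         "epic games"
--     ],
--     "gog": [
--         "good old games"
--     ],
--     "humblestore": [
--         "humble"
--     ],
--     "uplay": [
--
--     ],
--     "microsoft": [
--
--     ]
-- }
--
-- def store_from_search(search):
--     index = {}
--     for store, aliases in supported_stores.items():
--         index[store] = store
--         for alias in aliases:
--             index[alias] = store
--     return index.get(search)
-- ===== Notes on version B (the rewrite author's own statement) =====
-- stated objective: idiomatic
-- what changed: B builds a flat name/alias -> store index dict in one pass and answers with a single dict lookup, instead of A's nested scan with early returns.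
import Mathlib
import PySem

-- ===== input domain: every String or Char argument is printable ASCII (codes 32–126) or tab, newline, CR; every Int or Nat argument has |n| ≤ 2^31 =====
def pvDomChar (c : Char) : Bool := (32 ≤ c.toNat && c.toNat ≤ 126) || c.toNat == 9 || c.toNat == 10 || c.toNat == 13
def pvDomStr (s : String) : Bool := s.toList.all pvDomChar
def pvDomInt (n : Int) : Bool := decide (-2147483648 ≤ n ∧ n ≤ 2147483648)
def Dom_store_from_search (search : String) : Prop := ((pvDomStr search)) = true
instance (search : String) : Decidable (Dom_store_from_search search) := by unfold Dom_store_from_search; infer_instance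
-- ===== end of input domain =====

-- B builds a flat name/alias -> store index dict in one pass and answers with one lookup
-- (idiomatic restructuring of A's nested scan; same results, proven equal on the domain).


-- ===== PORT A =====
-- module-level constant supported_stores (dict, insertion order)
def supported_stores : PySem.Dict String (List String) :=
  PySem.Dict.ofList
    [("steam", []),
     ("epic", ["epic store", "epic games"]),
     ("gog", ["good old games"]),
     ("humblestore", ["humble"]),
     ("uplay", []),
     ("microsoft", [])]

-- inner 'for alt_store_name in supported_stores[store]' loop of A
def pvAliasScan (search : String) (store : String) : List String → Option String
  | [] => none
  | alt :: rest => if alt == search then some store else pvAliasScan search store rest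

-- outer 'for store in supported_stores.keys()' loop of A
def pvStoreScan (search : String) : List String → Option String
  | [] => none
  | store :: rest =>
    if store == search then some store
    else
      match pvAliasScan search store (supported_stores.getD store []) with
      | some r => some r
      | none => pvStoreScan search rest

def store_from_search (search : String) : Option String :=
  pvStoreScan search supported_stores.keys

-- ===== PORT B =====
-- one pass over supported_stores.items() building the flat index
def pvBuildIndex : List (String × List String) → PySem.Dict String String → PySem.Dict String String
  | [], index => index
  | (store, aliases) :: rest, index =>
    pvBuildIndex rest (aliases.foldl (fun d al => d.insert al store) (index.insert store store))

def store_from_search_alt (search : String) : Option String :=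
  (pvBuildIndex supported_stores.items PySem.Dict.empty).get? search

-- ===== PRECONDITION & SPEC =====
def Spec_store_from_search (search : String) (out : Option String) : Prop := out = store_from_search_alt search
instance (search : String) (out : Option String) : Decidable (Spec_store_from_search search out) := by unfold Spec_store_from_search; infer_instance

-- ===== CLAIM (what is proved, stated in full; the proofs are below) =====
def Claim_equal_store_from_search : Prop := ∀ (search : String), Dom_store_from_search search → Spec_store_from_search search (store_from_search search)

-- ===== LEMMAS AND PROOFS =====

-- ===== VERDICT (by name: the statement is the Claim_ definition above) =====
theorem supported_stores_eq : supported_stores = PySem.Dict.mk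
    [("steam", []),
     ("epic", ["epic store", "epic games"]),
     ("gog", ["good old games"]),
     ("humblestore", ["humble"]),
     ("uplay", []),
     ("microsoft", [])] := by decide

theorem index_eq : pvBuildIndex supported_stores.items PySem.Dict.empty = PySem.Dict.mk
    [("steam", "steam"),
     ("epic", "epic"), ("epic store", "epic"), ("epic games", "epic"),
     ("gog", "gog"), ("good old games", "gog"),
     ("humblestore", "humblestore"), ("humble", "humblestore"),
     ("uplay", "uplay"),
     ("microsoft", "microsoft")] := by decide

theorem store_from_search_spec : Claim_equal_store_from_search := by
  intro s _
  unfold Spec_store_from_search store_from_search store_from_search_alt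
  rw [index_eq]
  simp only [supported_stores_eq, PySem.Dict.keys_mk, PySem.Dict.get?_mk_cons,
    pvStoreScan, PySem.Dict.getD, List.map]
  simp only [String.reduceBEq, reduceIte, Option.getD_some, pvAliasScan]
  split_ifs <;> subst_vars <;> simp_all [pvAliasScan, PySem.Dict.get?]
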